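-- pv_equiv track=rewrite | github.com/Dhananjay09/Coding-Questions | Array/e-no-of-off-fibinache.py | solve
-- ===== SOURCE A (Python) =====
-- def solve(A, B):
--     ans = 0
--     while A % 3 != 0:
--         ans += 1
--         A += 1
--     while B % 3 != 0:
--         ans += 1
--         B -= 1
--     ans += ((B - A) * 2) // 3
--     return ans
-- ===== SOURCE B (Python) =====
-- def solve(A, B):
--     # closed form: length of [A,B] minus number of multiples of 3 in it
--     return (B - A + 1) - (B // 3 - (A - 1) // 3)
-- ===== Notes on version B (the rewrite author's own statement) =====
-- stated objective: simpler
-- what changed: Replaced the two adjustment while-loops and the scaled floor division by a single closed-form expression: the span length (B-A+1) minus the count of multiples of 3 in [A,B], computed as B//3 - (A-1)//3.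
import Mathlib
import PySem

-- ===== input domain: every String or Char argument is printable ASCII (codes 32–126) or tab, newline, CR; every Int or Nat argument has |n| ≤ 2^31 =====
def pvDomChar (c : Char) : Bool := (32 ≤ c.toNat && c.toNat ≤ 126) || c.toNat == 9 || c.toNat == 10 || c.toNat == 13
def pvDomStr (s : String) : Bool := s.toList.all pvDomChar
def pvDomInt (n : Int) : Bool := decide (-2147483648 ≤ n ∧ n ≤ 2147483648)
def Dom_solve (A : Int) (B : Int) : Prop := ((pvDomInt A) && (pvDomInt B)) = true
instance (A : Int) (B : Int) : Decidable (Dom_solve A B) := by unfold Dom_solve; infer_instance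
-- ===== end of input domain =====

-- B replaces A's two adjustment while-loops by one closed-form expression (objective: simpler).

-- ===== PORT A =====
-- 'while A % 3 != 0: ans += 1; A += 1' — runs at most 2 iterations (Python % with
-- positive divisor is nonnegative), transliterated with fuel 3 for totality only.
def solveUpLoop : Nat → Int → Int → Int × Int
  | 0, ans, A => (ans, A)
  | f + 1, ans, A =>
      if PySem.Int.mod A 3 ≠ 0 then solveUpLoop f (ans + 1) (A + 1) else (ans, A)

-- 'while B % 3 != 0: ans += 1; B -= 1'
def solveDownLoop : Nat → Int → Int → Int × Int
  | 0, ans, B => (ans, B)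
  | f + 1, ans, B =>
      if PySem.Int.mod B 3 ≠ 0 then solveDownLoop f (ans + 1) (B - 1) else (ans, B)

def solve (A : Int) (B : Int) : Int :=
  let p := solveUpLoop 3 0 A
  let q := solveDownLoop 3 p.1 B
  q.1 + PySem.Int.floordiv ((q.2 - p.2) * 2) 3

-- ===== PORT B =====
def solve_alt (A : Int) (B : Int) : Int :=
  (B - A + 1) - (PySem.Int.floordiv B 3 - PySem.Int.floordiv (A - 1) 3)

-- ===== PRECONDITION & SPEC =====
def Spec_solve (A : Int) (B : Int) (out : Int) : Prop := out = solve_alt A B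
instance (A : Int) (B : Int) (out : Int) : Decidable (Spec_solve A B out) := by unfold Spec_solve; infer_instance

-- ===== CLAIM (what is proved, stated in full; the proofs are below) =====
def Claim_equal_solve : Prop := ∀ (A : Int) (B : Int), Dom_solve A B → Spec_solve A B (solve A B)

-- ===== LEMMAS AND PROOFS =====

theorem solveUpLoop_eq (ans A : Int) :
    solveUpLoop 3 ans A = (ans + (3 - A) % 3, A + (3 - A) % 3) := by
  have h0 : PySem.Int.mod A 3 = A % 3 := PySem.Int.mod_eq_emod_of_pos (by norm_num)
  have h1 : PySem.Int.mod (A + 1) 3 = (A + 1) % 3 := PySem.Int.mod_eq_emod_of_pos (by norm_num)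
  have h2 : PySem.Int.mod (A + 1 + 1) 3 = (A + 1 + 1) % 3 := PySem.Int.mod_eq_emod_of_pos (by norm_num)
  simp only [solveUpLoop, h0, h1, h2]
  split_ifs with ha hb hc <;> simp_all <;> omega

theorem solveDownLoop_eq (ans B : Int) :
    solveDownLoop 3 ans B = (ans + B % 3, B - B % 3) := by
  have h0 : PySem.Int.mod B 3 = B % 3 := PySem.Int.mod_eq_emod_of_pos (by norm_num)
  have h1 : PySem.Int.mod (B - 1) 3 = (B - 1) % 3 := PySem.Int.mod_eq_emod_of_pos (by norm_num)
  have h2 : PySem.Int.mod (B - 1 - 1) 3 = (B - 1 - 1) % 3 := PySem.Int.mod_eq_emod_of_pos (by norm_num)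
  simp only [solveDownLoop, h0, h1, h2]
  split_ifs with ha hb hc <;> simp_all <;> omega

-- ===== VERDICT (by name: the statement is the Claim_ definition above) =====
theorem solve_spec : Claim_equal_solve := by
  intro A B _
  unfold Spec_solve solve solve_alt
  simp only [solveUpLoop_eq, solveDownLoop_eq]
  rw [PySem.Int.floordiv_eq_ediv_of_pos (by norm_num),
      PySem.Int.floordiv_eq_ediv_of_pos (by norm_num),
      PySem.Int.floordiv_eq_ediv_of_pos (by norm_num)]
  omega
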